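-- pv_equiv track=rewrite | github.com/ericmerle3789/Collatz-Junction-Theorem | scripts/research/r58_dlog_theory.py | compute_Nr_via_delta
-- ===== SOURCE A (Python) =====
-- from collections import defaultdict, Counter
--
-- def compute_Nr_via_delta(M, g, p, ord2, dlog_table):
--     """Reformulation via delta = b - a. Returns Nr dict.
--     Uses dlog to determine which a values contribute for each delta."""
--     Nr = Counter()
--     for delta in range(M + 1):
--         c_delta = (1 + g * pow(2, delta, p)) % p
--         if c_delta == 0:
--             # 2^a * 0 = 0 mod p for all a in [0, M-delta]
--             Nr[0] += (M - delta + 1)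
--         else:
--             for a in range(M - delta + 1):
--                 r = (pow(2, a, p) * c_delta) % p
--                 Nr[r] += 1
--     return Nr
-- ===== SOURCE B (Python) =====
-- def compute_Nr_via_delta(M, g, p, ord2, dlog_table):
--     """Same counts, computed per residue class of 2^a mod p: precompute the
--     orbit of 2 mod p with its cycle, then for each delta add a closed-form
--     count per orbit element instead of looping over every a."""
--     Nr = {}
--     if M < 0:
--         return Nr
--     # orbit s[i] = 2^i % p, stopping at the first repeat (or at length M+1)
--     s = []
--     seen = {}
--     x = 1 % p
--     while len(s) <= M and x not in seen:
--         seen[x] = len(s)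
--         s.append(x)
--         x = (2 * x) % p
--     t = seen.get(x) if len(s) <= M else None  # cycle start (None if no repeat found)
--     m = len(s)
--     L = None if t is None else m - t
--     for delta in range(M + 1):
--         pw = s[delta] if delta < m else s[t + (delta - t) % L]
--         c = (1 + g * pw) % p
--         N = M - delta
--         if c == 0:
--             Nr[0] = Nr.get(0, 0) + (N + 1)
--         else:
--             for i in range(min(N + 1, m)):
--                 if t is None or i < t:
--                     cnt = 1
--                 else:
--                     cnt = (N - i) // L + 1
--                 r = (s[i] * c) % p
--                 Nr[r] = Nr.get(r, 0) + cnt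
--     return Nr
-- ===== Notes on version B (the rewrite author's own statement) =====
-- stated objective: faster
-- what changed: B precomputes the orbit s[i] = 2^i mod p once with dict-based cycle detection (pre-period t, period L) and replaces A's inner loop over every exponent a (each with its own pow call) by one closed-form count (N-i)//L + 1 per orbit element, emitting keys in the same first-appearance order.
import Mathlib
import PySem

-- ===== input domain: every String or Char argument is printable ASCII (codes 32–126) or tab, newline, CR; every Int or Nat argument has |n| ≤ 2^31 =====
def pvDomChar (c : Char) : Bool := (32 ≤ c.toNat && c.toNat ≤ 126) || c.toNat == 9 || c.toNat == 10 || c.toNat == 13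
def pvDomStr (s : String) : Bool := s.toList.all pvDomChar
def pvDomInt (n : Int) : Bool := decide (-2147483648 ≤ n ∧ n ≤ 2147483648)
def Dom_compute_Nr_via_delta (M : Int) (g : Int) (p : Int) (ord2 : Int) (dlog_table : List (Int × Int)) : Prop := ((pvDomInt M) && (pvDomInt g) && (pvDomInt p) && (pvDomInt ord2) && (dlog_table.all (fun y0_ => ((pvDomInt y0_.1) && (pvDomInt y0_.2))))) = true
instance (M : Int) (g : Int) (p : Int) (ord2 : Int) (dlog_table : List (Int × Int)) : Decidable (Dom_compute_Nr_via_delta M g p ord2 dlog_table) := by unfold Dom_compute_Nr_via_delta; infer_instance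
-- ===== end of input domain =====

-- B replaces A's inner loop over every exponent a by one closed-form count per element of the
-- (pre-)periodic orbit of 2 mod p (cycle found once, up front), producing the same Counter.

-- ===== PORT A =====
def compute_Nr_via_delta (M : Int) (g : Int) (p : Int) (ord2 : Int) (dlog_table : List (Int × Int)) : List (Int × Int) :=
  ((PySem.List.pyRange 0 (M + 1) 1).foldl (fun Nr delta =>
      let c_delta := PySem.Int.mod (1 + g * PySem.Int.powMod 2 delta.toNat p) p
      if c_delta = 0 then
        Nr.modify 0 0 (· + (M - delta + 1))
      else
        (PySem.List.pyRange 0 (M - delta + 1) 1).foldl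
          (fun Nr a => Nr.modify (PySem.Int.mod (PySem.Int.powMod 2 a.toNat p * c_delta) p) 0 (· + 1)) Nr)
    (PySem.Dict.empty : PySem.Dict Int Int)).items

-- ===== PORT B =====
-- the while-loop of Source B: fuel = how many more appends the `len(s) <= M` bound allows
def pvAltBuild (p : Int) : Nat → List Int → PySem.Dict Int Int → Int → List Int × PySem.Dict Int Int × Int
  | 0, s, seen, x => (s, seen, x)
  | fuel + 1, s, seen, x =>
      if seen.contains x then (s, seen, x)
      else pvAltBuild p fuel (s ++ [x]) (seen.insert x (s.length : Int)) (PySem.Int.mod (2 * x) p)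

def compute_Nr_via_delta_alt (M : Int) (g : Int) (p : Int) (ord2 : Int) (dlog_table : List (Int × Int)) : List (Int × Int) :=
  if M < 0 then [] else
    let r := pvAltBuild p (M + 1).toNat [] PySem.Dict.empty (PySem.Int.mod 1 p)
    let s := r.1
    let seen := r.2.1
    let x := r.2.2
    let m : Int := PySem.List.len s
    let t : Option Int := if m ≤ M then seen.get? x else none
    ((PySem.List.pyRange 0 (M + 1) 1).foldl (fun Nr delta =>
        let pw := if delta < m then PySem.List.pyGetD s delta 0
                  else match t with
                       | some t0 => PySem.List.pyGetD s (t0 + PySem.Int.mod (delta - t0) (m - t0)) 0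
                       | none => 0   -- unreachable: t = none forces m = M + 1 > delta
        let c := PySem.Int.mod (1 + g * pw) p
        let N := M - delta
        if c = 0 then
          Nr.modify 0 0 (· + (N + 1))
        else
          (PySem.List.pyRange 0 (min (N + 1) m) 1).foldl
            (fun Nr i =>
              let cnt := match t with
                         | none => 1
                         | some t0 => if i < t0 then 1 else PySem.Int.floordiv (N - i) (m - t0) + 1
              Nr.modify (PySem.Int.mod (PySem.List.pyGetD s i 0 * c) p) 0 (· + cnt)) Nr)
      (PySem.Dict.empty : PySem.Dict Int Int)).items

-- ===== PRECONDITION & SPEC =====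
-- Pre_ excludes only p = 0 with M ≥ 0, where A raises ValueError from pow(2, delta, 0).
def Pre_compute_Nr_via_delta (M : Int) (g : Int) (p : Int) (ord2 : Int) (dlog_table : List (Int × Int)) : Prop :=
  p ≠ 0 ∨ M < 0
instance (M : Int) (g : Int) (p : Int) (ord2 : Int) (dlog_table : List (Int × Int)) : Decidable (Pre_compute_Nr_via_delta M g p ord2 dlog_table) := by unfold Pre_compute_Nr_via_delta; infer_instance
def pvWitness_compute_Nr_via_delta : Int × Int × Int × Int × (List (Int × Int)) := (3, 1, 5, 4, [])

def Spec_compute_Nr_via_delta (M : Int) (g : Int) (p : Int) (ord2 : Int) (dlog_table : List (Int × Int)) (out : List (Int × Int)) : Prop := out = compute_Nr_via_delta_alt M g p ord2 dlog_table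
instance (M : Int) (g : Int) (p : Int) (ord2 : Int) (dlog_table : List (Int × Int)) (out : List (Int × Int)) : Decidable (Spec_compute_Nr_via_delta M g p ord2 dlog_table out) := by unfold Spec_compute_Nr_via_delta; infer_instance

-- ===== CLAIM (what is proved, stated in full; the proofs are below) =====
def Claim_equal_compute_Nr_via_delta : Prop := ∀ (M : Int) (g : Int) (p : Int) (ord2 : Int) (dlog_table : List (Int × Int)), Dom_compute_Nr_via_delta M g p ord2 dlog_table → Pre_compute_Nr_via_delta M g p ord2 dlog_table → Spec_compute_Nr_via_delta M g p ord2 dlog_table (compute_Nr_via_delta M g p ord2 dlog_table)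

-- ===== LEMMAS AND PROOFS =====

-- ---- Counter (Dict Int Int) machinery: a fold of `modify key 0 (· + w)` steps ----
def wBump (d : PySem.Dict Int Int) (l : List (Int × Int)) : PySem.Dict Int Int :=
  l.foldl (fun d x => d.modify x.1 0 (· + x.2)) d

def wWeight (l : List (Int × Int)) (k : Int) : Int :=
  ((l.filter (fun x => x.1 == k)).map (·.2)).sum

theorem wBump_append (d : PySem.Dict Int Int) (l1 l2 : List (Int × Int)) :
    wBump d (l1 ++ l2) = wBump (wBump d l1) l2 := List.foldl_append ..

theorem getD_wBump (d : PySem.Dict Int Int) (l : List (Int × Int)) (k : Int) :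
    (wBump d l).getD k 0 = d.getD k 0 + wWeight l k := by
  induction l generalizing d with
  | nil => simp [wBump, wWeight]
  | cons x l ih =>
    simp only [wBump, List.foldl_cons] at *
    have hw : wWeight (x :: l) k = (if x.1 = k then x.2 else 0) + wWeight l k := by
      simp only [wWeight, List.filter_cons]
      by_cases h : x.1 = k <;> simp [h]
    rw [ih, PySem.Dict.getD_modify, hw]
    by_cases h : k = x.1
    · rw [if_pos h, if_pos h.symm, h]; ring
    · rw [if_neg h, if_neg (fun hh => h hh.symm)]; ring

theorem keys_wBump (d : PySem.Dict Int Int) (l : List (Int × Int)) :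
    (wBump d l).keys = PySem.Set.update d.keys (l.map (·.1)) :=
  PySem.Dict.keys_foldl_modify_key l (·.1) 0 (fun _ x v => v + x.2) d

theorem nodup_keys_wBump (d : PySem.Dict Int Int) (l : List (Int × Int)) (h : d.keys.Nodup) :
    (wBump d l).keys.Nodup :=
  PySem.Dict.nodup_keys_foldl_modify_key l (·.1) 0 (fun _ x v => v + x.2) d h

theorem ofList_update_congr (s : PySem.Set Int) (xs ys : List Int)
    (h : PySem.Set.ofList xs = PySem.Set.ofList ys) : PySem.Set.update s xs = PySem.Set.update s ys := by
  rw [PySem.Set.update_eq_append_filter, PySem.Set.update_eq_append_filter, h]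

theorem wBump_congr (d : PySem.Dict Int Int) (hnd : d.keys.Nodup) (l1 l2 : List (Int × Int))
    (hk : PySem.Set.ofList (l1.map (·.1)) = PySem.Set.ofList (l2.map (·.1)))
    (hw : ∀ k, wWeight l1 k = wWeight l2 k) : wBump d l1 = wBump d l2 := by
  have n1 : (wBump d l1).keys.Nodup := nodup_keys_wBump d l1 hnd
  have n2 : (wBump d l2).keys.Nodup := nodup_keys_wBump d l2 hnd
  have hkeys : (wBump d l1).keys = (wBump d l2).keys := by
    rw [keys_wBump, keys_wBump]; exact ofList_update_congr _ _ _ hk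
  apply PySem.Dict.ext
  rw [PySem.Dict.items_eq_map_keys _ n1 0, PySem.Dict.items_eq_map_keys _ n2 0, hkeys]
  apply List.map_congr_left
  intro k _
  rw [getD_wBump, getD_wBump, hw k]

theorem wBump_flatMap (blk : Int → List (Int × Int)) (l : List Int) (d : PySem.Dict Int Int) :
    l.foldl (fun d δ => wBump d (blk δ)) d = wBump d (l.flatMap blk) := by
  induction l generalizing d with
  | nil => rfl
  | cons a l ih => simp only [List.foldl_cons, List.flatMap_cons, wBump_append, ih]

theorem wWeight_append (l1 l2 : List (Int × Int)) (k : Int) :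
    wWeight (l1 ++ l2) k = wWeight l1 k + wWeight l2 k := by
  simp [wWeight, List.filter_append]

theorem wWeight_flatMap_congr (l : List Int) (f g : Int → List (Int × Int))
    (h : ∀ δ ∈ l, ∀ k, wWeight (f δ) k = wWeight (g δ) k) (k : Int) :
    wWeight (l.flatMap f) k = wWeight (l.flatMap g) k := by
  induction l with
  | nil => rfl
  | cons a l ih =>
    simp only [List.flatMap_cons, wWeight_append]
    rw [h a (by simp), ih (fun δ hδ k => h δ (by simp [hδ]) k)]

theorem update_flatMap_congr (f g : Int → List Int) :
    ∀ l : List Int, (∀ δ ∈ l, PySem.Set.ofList (f δ) = PySem.Set.ofList (g δ)) →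
      ∀ s : PySem.Set Int, PySem.Set.update s (l.flatMap f) = PySem.Set.update s (l.flatMap g) := by
  intro l
  induction l with
  | nil => intro _ _; rfl
  | cons a l ih =>
    intro h s
    simp only [List.flatMap_cons, PySem.Set.update_append]
    rw [ofList_update_congr s _ _ (h a (by simp))]
    exact ih (fun δ hδ => h δ (by simp [hδ])) _

theorem ofList_flatMap_congr (l : List Int) (f g : Int → List Int)
    (h : ∀ δ ∈ l, PySem.Set.ofList (f δ) = PySem.Set.ofList (g δ)) :
    PySem.Set.ofList (l.flatMap f) = PySem.Set.ofList (l.flatMap g) := by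
  rw [← PySem.Set.update_nil_left, ← PySem.Set.update_nil_left]
  exact update_flatMap_congr f g l h []

-- ---- Python floor-division / mod arithmetic ----
theorem pymod_dvd_sub (a p : Int) : p ∣ a - PySem.Int.mod a p :=
  ⟨PySem.Int.floordiv a p, by have := PySem.Int.floordiv_mul_add_mod a p; ring_nf; linarith [this]⟩

theorem pymod_eq_of_dvd_sub (a b p : Int) (hp : p ≠ 0) (h : p ∣ a - b) :
    PySem.Int.mod a p = PySem.Int.mod b p := by
  have h1 := pymod_dvd_sub a p
  have h2 := pymod_dvd_sub b p
  have hd : p ∣ PySem.Int.mod a p - PySem.Int.mod b p := by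
    have e : PySem.Int.mod a p - PySem.Int.mod b p
        = (a - b) - (a - PySem.Int.mod a p) + (b - PySem.Int.mod b p) := by ring
    rw [e]
    exact dvd_add (dvd_sub h h1) h2
  have habs : |PySem.Int.mod a p - PySem.Int.mod b p| < |p| := by
    rcases lt_or_gt_of_ne hp with hneg | hpos
    · have e1 := PySem.Int.mod_neg_bounds a hneg
      have e2 := PySem.Int.mod_neg_bounds b hneg
      rw [abs_of_neg hneg, abs_lt]
      omega
    · have e1n := PySem.Int.mod_nonneg a hpos
      have e1l := PySem.Int.mod_lt a hpos
      have e2n := PySem.Int.mod_nonneg b hpos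
      have e2l := PySem.Int.mod_lt b hpos
      rw [abs_of_pos hpos, abs_lt]
      omega
  have := Int.eq_zero_of_abs_lt_dvd ((abs_dvd p _).mpr hd) habs
  omega

theorem dvd_sub_of_pymod_eq (a b p : Int) (h : PySem.Int.mod a p = PySem.Int.mod b p) :
    p ∣ a - b := by
  have h1 := pymod_dvd_sub a p
  have h2 := pymod_dvd_sub b p
  have : a - b = (a - PySem.Int.mod a p) - (b - PySem.Int.mod b p) := by rw [h]; ring
  rw [this]; exact dvd_sub h1 h2

theorem pymod_mul_mod (a b p : Int) (hp : p ≠ 0) :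
    PySem.Int.mod (a * PySem.Int.mod b p) p = PySem.Int.mod (a * b) p := by
  apply pymod_eq_of_dvd_sub _ _ _ hp
  have : a * PySem.Int.mod b p - a * b = -(a * (b - PySem.Int.mod b p)) := by ring
  rw [this]
  exact (dvd_neg).mpr ((pymod_dvd_sub b p).mul_left a)

theorem pyfd_mod_unique (a L q r : Int) (hL : 0 < L) (hr : 0 ≤ r) (hr2 : r < L)
    (h : a = q * L + r) : PySem.Int.floordiv a L = q ∧ PySem.Int.mod a L = r := by
  have hfd : PySem.Int.floordiv a L = q := by
    rw [PySem.Int.floordiv_eq_iff_of_pos hL]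
    have e : (q + 1) * L = q * L + L := by ring
    constructor <;> [linarith; linarith [e]]
  refine ⟨hfd, ?_⟩
  have := PySem.Int.floordiv_mul_add_mod a L
  rw [hfd] at this
  linarith

theorem pymod_eq_iff (a L r : Int) (hL : 0 < L) :
    PySem.Int.mod a L = r ↔ 0 ≤ r ∧ r < L ∧ L ∣ a - r := by
  constructor
  · rintro rfl
    exact ⟨PySem.Int.mod_nonneg a hL, PySem.Int.mod_lt a hL, pymod_dvd_sub a L⟩
  · rintro ⟨h1, h2, k, hk⟩
    exact (pyfd_mod_unique a L k r hL h1 h2 (by linarith [mul_comm L k])).2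

theorem pyfd_step (a L : Int) (hL : 0 < L) (ha : 1 ≤ a) :
    PySem.Int.floordiv a L = PySem.Int.floordiv (a - 1) L + (if L ∣ a then 1 else 0) := by
  by_cases hdv : L ∣ a
  · obtain ⟨k, hk⟩ := hdv
    have hk1 : 1 ≤ k := by nlinarith
    have u1 := pyfd_mod_unique a L k 0 hL le_rfl hL (by linarith [mul_comm L k])
    have u2 := pyfd_mod_unique (a - 1) L (k - 1) (L - 1) hL (by omega) (by omega) (by nlinarith)
    rw [u1.1, u2.1, if_pos ⟨k, hk⟩]
    ring
  · have h0 : PySem.Int.mod a L ≠ 0 := fun hc => hdv ((PySem.Int.mod_eq_zero_iff_dvd a L).mp hc)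
    have hnn := PySem.Int.mod_nonneg a hL
    have hlt := PySem.Int.mod_lt a hL
    have base := PySem.Int.floordiv_mul_add_mod a L
    have u2 := pyfd_mod_unique (a - 1) L (PySem.Int.floordiv a L) (PySem.Int.mod a L - 1) hL
      (by omega) (by omega) (by linarith)
    rw [u2.1, if_neg hdv]
    ring

-- ---- the orbit of 2 mod p ----
def oPow (p : Int) (a : Nat) : Int := PySem.Int.mod (2 ^ a) p

theorem oPow_step (p : Int) (hp : p ≠ 0) (n : Nat) :
    PySem.Int.mod (2 * oPow p n) p = oPow p (n + 1) := by
  unfold oPow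
  rw [pymod_mul_mod 2 (2 ^ n) p hp, pow_succ]
  ring_nf

theorem orbit_per (p : Int) (hp : p ≠ 0) (t0 L : Int) (ht0 : 0 ≤ t0) (hL : 0 < L)
    (hcyc : oPow p (t0 + L).toNat = oPow p t0.toNat) :
    ∀ n : Nat, ∀ a : Int, a = t0 + n →
      oPow p a.toNat = oPow p (t0 + PySem.Int.mod (a - t0) L).toNat := by
  intro n
  induction n using Nat.strong_induction_on with
  | _ n ih =>
    intro a ha
    by_cases hlt : (n : Int) < L
    · have hmod : PySem.Int.mod (a - t0) L = a - t0 :=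
        (pymod_eq_iff _ _ _ hL).mpr ⟨by omega, by omega, by simp⟩
      rw [hmod, show t0 + (a - t0) = a from by ring]
    · have hL' : (L : Int) ≤ n := by omega
      have hstep : oPow p a.toNat = oPow p (a - L).toNat := by
        unfold oPow
        apply pymod_eq_of_dvd_sub _ _ _ hp
        have hdc : p ∣ ((2 : Int) ^ (t0 + L).toNat - 2 ^ t0.toNat) :=
          dvd_sub_of_pymod_eq _ _ _ hcyc
        have e : ((2 : Int) ^ a.toNat - 2 ^ (a - L).toNat)
            = 2 ^ (a.toNat - (t0 + L).toNat) * ((2 : Int) ^ (t0 + L).toNat - 2 ^ t0.toNat) := by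
          rw [mul_sub, ← pow_add, ← pow_add]
          congr 2 <;> omega
        rw [e]
        exact hdc.mul_left _
      have hrec := ih (n - L.toNat) (by omega) (a - L) (by push_cast [Nat.cast_sub (by omega : L.toNat ≤ n)]; omega)
      rw [hstep, hrec]
      have hmm : PySem.Int.mod (a - L - t0) L = PySem.Int.mod (a - t0) L :=
        pymod_eq_of_dvd_sub _ _ _ (ne_of_gt hL) ⟨-1, by ring⟩
      rw [hmm]

-- ---- counting fibers ----
theorem sum_map_add_int (js : List Int) (c d : Int → Int) :
    (js.map (fun j => c j + d j)).sum = (js.map c).sum + (js.map d).sum := by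
  induction js with
  | nil => simp
  | cons j js ih => simp [ih]; ring

theorem sum_ite_eq_count (x : Int) (js : List Int) (hnd : js.Nodup) (c : Int → Int) :
    (js.map (fun j => if x = j then c j else 0)).sum = if x ∈ js then c x else 0 := by
  induction js with
  | nil => simp
  | cons j js ih =>
    simp only [List.map_cons, List.sum_cons, List.mem_cons]
    rcases List.nodup_cons.mp hnd with ⟨hj, hnd'⟩
    by_cases h : x = j
    · subst h
      rw [ih hnd', if_pos rfl, if_neg hj, if_pos (Or.inl rfl)]; ring
    · rw [if_neg h, ih hnd']
      by_cases hm : x ∈ js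
      · simp [hm, h]
      · simp [hm, h]

theorem fiber_core (l : List Int) (js : List Int) (f : Int → Int) (P : Int → Bool)
    (hnd : js.Nodup) (hmem : ∀ a ∈ l, f a ∈ js) :
    ((js.filter P).map (fun j => (l.countP (fun a => f a == j) : Int))).sum
      = (l.countP (fun a => P (f a)) : Int) := by
  induction l with
  | nil => simp
  | cons a l ih =>
    have hmem' : ∀ b ∈ l, f b ∈ js := fun b hb => hmem b (by simp [hb])
    have hfa : f a ∈ js := hmem a (by simp)
    have e : ∀ j ∈ js.filter P, ((a :: l).countP (fun b => f b == j) : Int)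
        = (l.countP (fun b => f b == j) : Int) + (if f a = j then 1 else 0) := by
      intro j _
      rw [List.countP_cons]
      by_cases h : f a = j <;> simp [h] <;> push_cast <;> ring
    rw [List.map_congr_left e, sum_map_add_int, ih hmem',
      sum_ite_eq_count (f a) (js.filter P) (hnd.filter P) (fun _ => (1 : Int))]
    rw [List.countP_cons]
    by_cases hP : P (f a) = true
    · rw [if_pos (List.mem_filter.mpr ⟨hfa, hP⟩)]
      simp [hP]
    · have hnm : f a ∉ js.filter P := fun hc => hP (List.mem_filter.mp hc).2
      rw [if_neg hnm]
      simp [Bool.of_not_eq_true hP]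

-- the number of a in [lo, lo+n) with t0 + ((a - t0) mod L) = j, for j in [t0, t0+L) and lo = t0+L
theorem count_cycle_fiber (L t0 j : Int) (hL : 0 < L) (ht : t0 ≤ j) (hj : j < t0 + L) :
    ∀ n : Nat,
      ((PySem.List.pyRange (t0 + L) (t0 + L + n) 1).countP
          (fun a => t0 + PySem.Int.mod (a - t0) L == j) : Int)
        = PySem.Int.floordiv (t0 + L + n - 1 - j) L := by
  intro n
  induction n with
  | zero =>
    rw [show ((0 : Nat) : Int) = 0 from rfl, add_zero,
      PySem.List.pyRange_one_eq_nil le_rfl]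
    simp only [List.countP_nil, Nat.cast_zero]
    exact ((pyfd_mod_unique _ L 0 (t0 + L - 1 - j) hL (by omega) (by omega) (by ring)).1).symm
  | succ n ihn =>
    have hcast : (((n : Nat) + 1 : Nat) : Int) = (n : Int) + 1 := by push_cast; ring
    rw [hcast, show t0 + L + ((n : Int) + 1) = (t0 + L + n) + 1 from by ring,
      PySem.List.pyRange_one_succ_right (by omega), List.countP_append]
    have hsingle : (List.countP (fun a => t0 + PySem.Int.mod (a - t0) L == j) [t0 + L + n])
        = if L ∣ (t0 + L + n - j) then 1 else 0 := by
      have hiff : (t0 + PySem.Int.mod (t0 + L + n - t0) L = j) ↔ L ∣ (t0 + L + n - j) := by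
        constructor
        · intro hh
          have : PySem.Int.mod (t0 + L + n - t0) L = j - t0 := by omega
          obtain ⟨_, _, hdvd⟩ := (pymod_eq_iff _ _ _ hL).mp this
          have e : t0 + L + n - t0 - (j - t0) = t0 + L + n - j := by ring
          rwa [e] at hdvd
        · intro hdvd
          have : PySem.Int.mod (t0 + L + n - t0) L = j - t0 := by
            rw [pymod_eq_iff _ _ _ hL]
            refine ⟨by omega, by omega, ?_⟩
            have e : t0 + L + n - t0 - (j - t0) = t0 + L + n - j := by ring
            rwa [e]
          omega
      simp only [List.countP_cons, List.countP_nil, beq_iff_eq]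
      by_cases hh : t0 + PySem.Int.mod (t0 + L + n - t0) L = j
      · rw [if_pos (hiff.mp hh)]; simp [hh]
      · rw [if_neg (fun hc => hh (hiff.mpr hc))]; simp [hh]
    push_cast [hsingle]
    rw [ihn]
    have hstep := pyfd_step (t0 + L + n - j) L hL (by omega)
    rw [show t0 + L + (n : Int) + 1 - 1 - j = t0 + L + (n : Int) - j from by ring, hstep,
      show t0 + L + (n : Int) - j - 1 = t0 + L + (n : Int) - 1 - j from by ring]

-- ---- the state of Source B's while loop ----
def buildInv (p : Int) (st : List Int × PySem.Dict Int Int × Int) : Prop :=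
  (∀ i : Nat, (hi : i < st.1.length) → st.1[i] = oPow p i) ∧
  st.2.2 = oPow p st.1.length ∧
  (∀ y v, st.2.1.get? y = some v → ∃ i : Nat, v = (i : Int) ∧ ∃ hi : i < st.1.length, st.1[i] = y)

theorem pvAltBuild_spec (p : Int) (hp : p ≠ 0) (fuel : Nat) :
    ∀ s seen x, buildInv p (s, seen, x) →
      buildInv p (pvAltBuild p fuel s seen x) ∧
      s.length ≤ (pvAltBuild p fuel s seen x).1.length ∧
      ((pvAltBuild p fuel s seen x).1.length = s.length + fuel ∨
        (pvAltBuild p fuel s seen x).2.1.contains (pvAltBuild p fuel s seen x).2.2 = true)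
      ∧ (pvAltBuild p fuel s seen x).1.length ≤ s.length + fuel := by
  induction fuel with
  | zero =>
    intro s seen x h
    exact ⟨h, le_rfl, Or.inl (by simp [pvAltBuild]), by simp [pvAltBuild]⟩
  | succ fuel ih =>
    intro s seen x h
    obtain ⟨h1, h2, h3⟩ := h
    replace h1 : ∀ i : Nat, (hi : i < s.length) → s[i] = oPow p i := h1
    replace h2 : x = oPow p s.length := h2
    replace h3 : ∀ y v, seen.get? y = some v →
        ∃ i : Nat, v = (i : Int) ∧ ∃ hi : i < s.length, s[i] = y := h3
    by_cases hc : seen.contains x = true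
    · simp only [pvAltBuild, if_pos hc]
      exact ⟨⟨h1, h2, h3⟩, le_rfl, Or.inr hc, by omega⟩
    · simp only [pvAltBuild, if_neg hc]
      have hinv' : buildInv p (s ++ [x], seen.insert x (s.length : Int), PySem.Int.mod (2 * x) p) := by
        refine ⟨?_, ?_, ?_⟩
        · intro i hi
          simp only [List.length_append, List.length_singleton] at hi
          by_cases hil : i < s.length
          · rw [List.getElem_append_left hil]
            exact h1 i hil
          · have hie : i = s.length := by omega
            subst hie
            rw [List.getElem_concat_length rfl]
            exact h2
        · simp only [List.length_append, List.length_singleton]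
          rw [h2, oPow_step p hp]
        · intro y v hg
          simp only [PySem.Dict.get?_insert] at hg
          by_cases hyx : y = x
          · rw [if_pos hyx] at hg
            have hv := Option.some.inj hg
            refine ⟨s.length, hv.symm, by simp, ?_⟩
            rw [List.getElem_concat_length rfl]
            exact hyx.symm
          · rw [if_neg hyx] at hg
            obtain ⟨i, hvi, hi, hsi⟩ := h3 y v hg
            refine ⟨i, hvi, by simp; omega, ?_⟩
            rw [List.getElem_append_left hi]
            exact hsi
      obtain ⟨r1, r2, r3, r4⟩ := ih (s ++ [x]) (seen.insert x (s.length : Int)) (PySem.Int.mod (2 * x) p) hinv'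
      refine ⟨r1, ?_, ?_, ?_⟩
      · simp only [List.length_append, List.length_singleton] at r2; omega
      · rcases r3 with h | h
        · left; simp only [List.length_append, List.length_singleton] at h; omega
        · right; exact h
      · simp only [List.length_append, List.length_singleton] at r4; omega

-- ---- the built orbit ----
def pvS (M p : Int) : List Int := (pvAltBuild p (M + 1).toNat [] PySem.Dict.empty (PySem.Int.mod 1 p)).1
def pvSeen (M p : Int) : PySem.Dict Int Int := (pvAltBuild p (M + 1).toNat [] PySem.Dict.empty (PySem.Int.mod 1 p)).2.1
def pvX (M p : Int) : Int := (pvAltBuild p (M + 1).toNat [] PySem.Dict.empty (PySem.Int.mod 1 p)).2.2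
def pvT (M p : Int) : Option Int :=
  if (PySem.List.len (pvS M p)) ≤ M then (pvSeen M p).get? (pvX M p) else none

theorem pvS_facts (M p : Int) (hp : p ≠ 0) (hM : 0 ≤ M) :
    (∀ i : Nat, (hi : i < (pvS M p).length) → (pvS M p)[i] = oPow p i) ∧
    ((pvS M p).length : Int) ≤ M + 1 ∧
    (pvT M p = none → ((pvS M p).length : Int) = M + 1) ∧
    (∀ t0, pvT M p = some t0 → 0 ≤ t0 ∧ t0 < ((pvS M p).length : Int) ∧
      oPow p t0.toNat = oPow p (pvS M p).length) := by
  have inv0 : buildInv p (([] : List Int), (PySem.Dict.empty : PySem.Dict Int Int), PySem.Int.mod 1 p) := by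
    refine ⟨?_, ?_, ?_⟩
    · intro i hi; simp at hi
    · simp [oPow]
    · intro y v hg; rw [PySem.Dict.get?_empty] at hg; exact absurd hg (by simp)
  obtain ⟨hinv, _, hdisj, hub⟩ :=
    pvAltBuild_spec p hp (M + 1).toNat [] PySem.Dict.empty (PySem.Int.mod 1 p) inv0
  obtain ⟨hv, hx, hseen⟩ := hinv
  have hvS : ∀ i : Nat, (hi : i < (pvS M p).length) → (pvS M p)[i] = oPow p i := hv
  have hxS : pvX M p = oPow p (pvS M p).length := hx
  have hseenS : ∀ y v, (pvSeen M p).get? y = some v →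
      ∃ i : Nat, v = (i : Int) ∧ ∃ hi : i < (pvS M p).length, (pvS M p)[i] = y := hseen
  have hdisjS : (pvS M p).length = (M + 1).toNat ∨ (pvSeen M p).contains (pvX M p) = true := by
    simpa using hdisj
  have hubS : (pvS M p).length ≤ (M + 1).toNat := by simpa using hub
  refine ⟨hvS, by omega, ?_, ?_⟩
  · intro ht
    unfold pvT at ht
    by_cases hlen : PySem.List.len (pvS M p) ≤ M
    · rw [if_pos hlen] at ht
      exfalso
      rw [PySem.Dict.get?_eq_none_iff_contains] at ht
      rcases hdisjS with hfull | hcont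
      · rw [PySem.List.len_eq] at hlen
        omega
      · rw [hcont] at ht
        simp at ht
    · rw [PySem.List.len_eq] at hlen
      omega
  · intro t0 ht
    unfold pvT at ht
    by_cases hlen : PySem.List.len (pvS M p) ≤ M
    · rw [if_pos hlen] at ht
      obtain ⟨i, hvi, hi, hsi⟩ := hseenS _ _ ht
      subst hvi
      refine ⟨by omega, by exact_mod_cast hi, ?_⟩
      rw [Int.toNat_natCast]
      exact (hvS i hi).symm.trans (hsi.trans hxS)
    · rw [if_neg hlen] at ht
      exact absurd ht (by simp)

-- ---- small helpers for the per-delta comparison ----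
theorem count_eq_one (l : List Int) (h : l.Nodup) (x : Int) (hx : x ∈ l) :
    l.countP (fun a => a == x) = 1 := by
  induction l with
  | nil => simp at hx
  | cons b l ih =>
    rcases List.nodup_cons.mp h with ⟨hb, hnd⟩
    rw [List.countP_cons]
    rcases List.mem_cons.mp hx with rfl | hxl
    · have hz : l.countP (fun a => a == x) = 0 := by
        rw [List.countP_eq_zero]
        intro a ha
        simp only [beq_iff_eq]
        exact fun he => hb (he ▸ ha)
      simp [hz]
    · rw [ih hnd hxl]
      have hne : ¬ (b = x) := fun he => hb (he ▸ hxl)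
      simp [hne]

theorem sum_ones_eq_countP (l : List Int) (q : Int → Bool) :
    ((l.filter q).map (fun _ => (1 : Int))).sum = (l.countP q : Int) := by
  rw [List.map_const', List.sum_replicate, List.countP_eq_length_filter]
  simp

theorem map_fst_map_pair (l : List Int) (f w : Int → Int) :
    ((l.map (fun a => (f a, w a))).map (fun x => x.1)) = l.map f := by
  simp [List.map_map, Function.comp_def]

theorem wWeight_map (l : List Int) (f w : Int → Int) (k : Int) :
    wWeight (l.map (fun a => (f a, w a))) k = ((l.filter (fun a => f a == k)).map w).sum := by
  unfold wWeight
  rw [List.filter_map, List.map_map]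
  rfl

-- the cycle case: A's one count per exponent a in [0, N] against B's closed-form count per
-- orbit position i in [0, |s|), via the fiber decomposition along idx a = if a < |s| then a else t0 + (a - t0) % L
theorem block_eq_core (p c : Int) (hp : p ≠ 0) (s : List Int) (t0 N L : Int)
    (hLdef : L = (s.length : Int) - t0)
    (hN : 0 ≤ N) (ht0nn : 0 ≤ t0) (ht0lt : t0 < (s.length : Int)) (hmlt : (s.length : Int) < N + 1)
    (hval : ∀ i : Nat, (hi : i < s.length) → s[i] = oPow p i)
    (hcyc : oPow p t0.toNat = oPow p s.length) :
    PySem.Set.ofList (((PySem.List.pyRange 0 (N + 1) 1).map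
        (fun a => (PySem.Int.mod (oPow p a.toNat * c) p, (1 : Int)))).map (fun x => x.1))
      = PySem.Set.ofList (((PySem.List.pyRange 0 ((s.length : Int)) 1).map
        (fun i => (PySem.Int.mod (PySem.List.pyGetD s i 0 * c) p,
          if i < t0 then 1 else PySem.Int.floordiv (N - i) L + 1))).map (fun x => x.1)) ∧
    ∀ k, wWeight ((PySem.List.pyRange 0 (N + 1) 1).map
          (fun a => (PySem.Int.mod (oPow p a.toNat * c) p, (1 : Int)))) k
        = wWeight ((PySem.List.pyRange 0 ((s.length : Int)) 1).map
          (fun i => (PySem.Int.mod (PySem.List.pyGetD s i 0 * c) p,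
            if i < t0 then 1 else PySem.Int.floordiv (N - i) L + 1))) k := by
  have hLpos : 0 < L := by omega
  have hcyc' : oPow p (t0 + L).toNat = oPow p t0.toNat := by
    rw [show (t0 + L).toNat = s.length from by omega]
    exact hcyc.symm
  have hper : ∀ a : Int, t0 ≤ a →
      oPow p a.toNat = oPow p (t0 + PySem.Int.mod (a - t0) L).toNat := fun a ha =>
    orbit_per p hp t0 L ht0nn hLpos hcyc' (a - t0).toNat a (by omega)
  have hmodnn : ∀ a : Int, 0 ≤ PySem.Int.mod (a - t0) L := fun a => PySem.Int.mod_nonneg _ hLpos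
  have hmodlt : ∀ a : Int, PySem.Int.mod (a - t0) L < L := fun a => PySem.Int.mod_lt _ hLpos
  have hgetI : ∀ i : Int, 0 ≤ i → i < (s.length : Int) →
      PySem.List.pyGetD s i 0 = oPow p i.toNat := by
    intro i h0 h1
    rw [PySem.List.pyGetD_eq_getElem s 0 h0 h1]
    exact hval i.toNat (by omega)
  set idx : Int → Int :=
    fun a => if a < (s.length : Int) then a else t0 + PySem.Int.mod (a - t0) L with hidxdef
  set keyI : Int → Int := fun i => PySem.Int.mod (PySem.List.pyGetD s i 0 * c) p with hkeyIdef
  have hidx_mem : ∀ a : Int, 0 ≤ a → 0 ≤ idx a ∧ idx a < (s.length : Int) ∧ idx a ≤ a := by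
    intro a ha
    rw [hidxdef]
    simp only
    split_ifs with h
    · exact ⟨ha, h, le_rfl⟩
    · refine ⟨by have := hmodnn a; omega, by have := hmodlt a; omega, ?_⟩
      have := hmodlt a
      have := hmodnn a
      omega
  have hkey : ∀ a : Int, 0 ≤ a → PySem.Int.mod (oPow p a.toNat * c) p = keyI (idx a) := by
    intro a ha
    rw [hkeyIdef]
    simp only
    obtain ⟨hi0, hi1, _⟩ := hidx_mem a ha
    rw [hgetI _ hi0 hi1]
    rw [hidxdef]
    simp only
    split_ifs with h
    · rfl
    · rw [← hper a (by omega)]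
  -- per-fiber counts
  have hfib : ∀ j : Int, 0 ≤ j → j < (s.length : Int) →
      ((PySem.List.pyRange 0 (N + 1) 1).countP (fun a => idx a == j) : Int)
        = if j < t0 then 1 else PySem.Int.floordiv (N - j) L + 1 := by
    intro j hj0 hj1
    rw [PySem.List.pyRange_one_append 0 ((s.length : Int)) (N + 1) (by omega) (by omega),
      List.countP_append]
    have h1 : (PySem.List.pyRange 0 ((s.length : Int)) 1).countP (fun a => idx a == j) = 1 := by
      rw [List.countP_congr (q := fun a => a == j) ?_]
      · exact count_eq_one _ (PySem.List.nodup_pyRange_one _ _)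
          j (PySem.List.mem_pyRange_one.mpr ⟨hj0, hj1⟩)
      · intro a ha
        rcases PySem.List.mem_pyRange_one.mp ha with ⟨_, hlt⟩
        rw [hidxdef]
        simp only
        rw [if_pos hlt]
    have h2c : ∀ a ∈ PySem.List.pyRange ((s.length : Int)) (N + 1) 1,
        (idx a == j) = (t0 + PySem.Int.mod (a - t0) L == j) := by
      intro a ha
      rcases PySem.List.mem_pyRange_one.mp ha with ⟨hge, _⟩
      rw [hidxdef]
      simp only
      rw [if_neg (by omega)]
    by_cases hjt : j < t0
    · have h2 : (PySem.List.pyRange ((s.length : Int)) (N + 1) 1).countP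
          (fun a => idx a == j) = 0 := by
        rw [List.countP_eq_zero]
        intro a ha
        rw [h2c a ha]
        simp only [beq_iff_eq]
        have := hmodnn a
        omega
      rw [if_pos hjt]
      push_cast [h1, h2]
    · have hjlt : j < t0 + L := by omega
      have h2 : ((PySem.List.pyRange ((s.length : Int)) (N + 1) 1).countP
          (fun a => idx a == j) : Int) = PySem.Int.floordiv (N - j) L := by
        have hc2 : (PySem.List.pyRange ((s.length : Int)) (N + 1) 1).countP (fun a => idx a == j)
            = (PySem.List.pyRange ((s.length : Int)) (N + 1) 1).countP
                (fun a => t0 + PySem.Int.mod (a - t0) L == j) := by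
          apply List.countP_congr
          intro a ha
          rw [h2c a ha]
        rw [hc2]
        have hn : (s.length : Int) + ((N + 1 - (s.length : Int)).toNat : Int) = N + 1 := by omega
        have hlen' : (s.length : Int) = t0 + L := by omega
        rw [show PySem.List.pyRange ((s.length : Int)) (N + 1) 1
            = PySem.List.pyRange (t0 + L) (t0 + L + ((N + 1 - (s.length : Int)).toNat : Int)) 1 from by
          rw [← hlen']; rw [show (s.length : Int) + ((N + 1 - (s.length : Int)).toNat : Int) = N + 1 from hn]]
        rw [count_cycle_fiber L t0 j hLpos (by omega) hjlt ((N + 1 - (s.length : Int)).toNat)]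
        congr 1
        omega
      rw [if_neg hjt]
      push_cast [h1]
      rw [h2]
      ring
  constructor
  · rw [map_fst_map_pair, map_fst_map_pair,
      List.map_congr_left (fun a ha => hkey a (PySem.List.mem_pyRange_one.mp ha).1),
      PySem.List.pyRange_one_append 0 ((s.length : Int)) (N + 1) (by omega) (by omega),
      List.map_append, PySem.Set.ofList_append,
      List.map_congr_left (g := keyI) (fun a ha => by
        rcases PySem.List.mem_pyRange_one.mp ha with ⟨_, hlt⟩
        rw [hidxdef]
        simp only
        rw [if_pos hlt]),
      PySem.Set.update_eq_append_filter]
    have hnil : ((PySem.Set.ofList ((PySem.List.pyRange ((s.length : Int)) (N + 1) 1).map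
        (fun a => keyI (idx a)))).filter
          (fun y => !(PySem.Set.ofList ((PySem.List.pyRange 0 ((s.length : Int)) 1).map keyI)).contains y)) = [] := by
      rw [List.filter_eq_nil_iff]
      intro y hy
      have hy' : y ∈ (PySem.List.pyRange ((s.length : Int)) (N + 1) 1).map (fun a => keyI (idx a)) :=
        (PySem.Set.mem_ofList _ _).mp hy
      rcases List.mem_map.mp hy' with ⟨a, ha, rfl⟩
      rcases PySem.List.mem_pyRange_one.mp ha with ⟨hge, _⟩
      obtain ⟨hi0, hi1, _⟩ := hidx_mem a (by omega)
      have hmem : keyI (idx a) ∈ PySem.Set.ofList ((PySem.List.pyRange 0 ((s.length : Int)) 1).map keyI) := by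
        rw [PySem.Set.mem_ofList]
        exact List.mem_map.mpr ⟨idx a, PySem.List.mem_pyRange_one.mpr ⟨hi0, hi1⟩, rfl⟩
      simp
      exact ⟨idx a, hi0, hi1, rfl⟩
    rw [hnil, List.append_nil]
  · intro k
    rw [wWeight_map, wWeight_map, sum_ones_eq_countP]
    have hcongr : (PySem.List.pyRange 0 (N + 1) 1).countP
        (fun a => PySem.Int.mod (oPow p a.toNat * c) p == k)
        = (PySem.List.pyRange 0 (N + 1) 1).countP (fun a => keyI (idx a) == k) := by
      apply List.countP_congr
      intro a ha
      rw [hkey a (PySem.List.mem_pyRange_one.mp ha).1]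
    rw [hcongr]
    rw [← fiber_core (PySem.List.pyRange 0 (N + 1) 1) (PySem.List.pyRange 0 ((s.length : Int)) 1)
      idx (fun j => keyI j == k) (PySem.List.nodup_pyRange_one _ _) (fun a ha => by
        rcases PySem.List.mem_pyRange_one.mp ha with ⟨ha0, _⟩
        obtain ⟨hi0, hi1, _⟩ := hidx_mem a ha0
        exact PySem.List.mem_pyRange_one.mpr ⟨hi0, hi1⟩)]
    simp only [hkeyIdef]
    refine congrArg List.sum (List.map_congr_left ?_)
    intro j hj
    rcases PySem.List.mem_pyRange_one.mp (List.mem_filter.mp hj).1 with ⟨hj0, hj1⟩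
    exact hfib j hj0 hj1

-- ---- block decomposition of the two ports ----
def blockA (M g p δ : Int) : List (Int × Int) :=
  let c := PySem.Int.mod (1 + g * PySem.Int.powMod 2 δ.toNat p) p
  if c = 0 then [(0, M - δ + 1)]
  else (PySem.List.pyRange 0 (M - δ + 1) 1).map
    (fun a => (PySem.Int.mod (PySem.Int.powMod 2 a.toNat p * c) p, 1))

def blockB (M g p : Int) (s : List Int) (t : Option Int) (δ : Int) : List (Int × Int) :=
  let m : Int := PySem.List.len s
  let pw := if δ < m then PySem.List.pyGetD s δ 0
            else match t with
                 | some t0 => PySem.List.pyGetD s (t0 + PySem.Int.mod (δ - t0) (m - t0)) 0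
                 | none => 0
  let c := PySem.Int.mod (1 + g * pw) p
  let N := M - δ
  if c = 0 then [(0, N + 1)]
  else (PySem.List.pyRange 0 (min (N + 1) m) 1).map
    (fun i => (PySem.Int.mod (PySem.List.pyGetD s i 0 * c) p,
       match t with
       | none => 1
       | some t0 => if i < t0 then 1 else PySem.Int.floordiv (N - i) (m - t0) + 1))

theorem portA_eq (M g p ord2 : Int) (dl : List (Int × Int)) :
    compute_Nr_via_delta M g p ord2 dl
      = (wBump PySem.Dict.empty ((PySem.List.pyRange 0 (M + 1) 1).flatMap (blockA M g p))).items := by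
  unfold compute_Nr_via_delta
  rw [← wBump_flatMap]
  congr 1
  congr 1
  funext d δ
  simp only [blockA]
  split_ifs with h
  · rfl
  · simp only [wBump, List.foldl_map]

theorem portB_eq (M g p ord2 : Int) (dl : List (Int × Int)) (h : ¬ M < 0) :
    compute_Nr_via_delta_alt M g p ord2 dl
      = (wBump PySem.Dict.empty
          ((PySem.List.pyRange 0 (M + 1) 1).flatMap (blockB M g p (pvS M p) (pvT M p)))).items := by
  unfold compute_Nr_via_delta_alt
  rw [if_neg h]
  dsimp only
  rw [← wBump_flatMap]
  simp only [blockB, pvS, pvT, pvSeen, pvX]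
  congr 1
  congr 1
  funext d δ
  dsimp only
  split_ifs <;> first | rfl | simp only [wBump, List.foldl_map]

-- ---- the per-delta comparison ----
theorem block_eq (M g p : Int) (hp : p ≠ 0) (hM : 0 ≤ M) (δ : Int) (hδ0 : 0 ≤ δ) (hδM : δ ≤ M) :
    PySem.Set.ofList ((blockA M g p δ).map (·.1))
        = PySem.Set.ofList ((blockB M g p (pvS M p) (pvT M p) δ).map (·.1)) ∧
    ∀ k, wWeight (blockA M g p δ) k = wWeight (blockB M g p (pvS M p) (pvT M p) δ) k := by
  obtain ⟨hS, hlen, hnone, hsome⟩ := pvS_facts M p hp hM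
  have hgetI : ∀ i : Int, 0 ≤ i → i < ((pvS M p).length : Int) →
      PySem.List.pyGetD (pvS M p) i 0 = oPow p i.toNat := by
    intro i h0 h1
    rw [PySem.List.pyGetD_eq_getElem (pvS M p) 0 h0 h1]
    exact hS i.toNat (by omega)
  have hpm : PySem.Int.powMod 2 δ.toNat p = oPow p δ.toNat := PySem.Int.powMod_eq 2 δ.toNat p
  rcases htc : pvT M p with _ | t0
  · have hmM : ((pvS M p).length : Int) = M + 1 := hnone htc
    have hδlt : δ < ((pvS M p).length : Int) := by omega
    have hlist : blockA M g p δ = blockB M g p (pvS M p) none δ := by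
      simp only [blockA, blockB, PySem.List.len_eq]
      rw [if_pos hδlt, hgetI δ hδ0 hδlt, hpm, min_eq_left (by omega)]
      by_cases hc : PySem.Int.mod (1 + g * oPow p δ.toNat) p = 0
      · rw [if_pos hc, if_pos hc]
      · rw [if_neg hc, if_neg hc]
        apply List.map_congr_left
        intro a ha
        rcases PySem.List.mem_pyRange_one.mp ha with ⟨ha0, ha1⟩
        have hpma : PySem.Int.powMod 2 a.toNat p = oPow p a.toNat := PySem.Int.powMod_eq 2 a.toNat p
        rw [hpma, hgetI a ha0 (by omega)]
    rw [hlist]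
    exact ⟨rfl, fun k => rfl⟩
  · obtain ⟨ht0nn, ht0lt, hcyc⟩ := hsome t0 htc
    have hLpos : 0 < ((pvS M p).length : Int) - t0 := by omega
    simp only [blockA, blockB, PySem.List.len_eq]
    have hpw : (if δ < ((pvS M p).length : Int) then PySem.List.pyGetD (pvS M p) δ 0
        else PySem.List.pyGetD (pvS M p)
          (t0 + PySem.Int.mod (δ - t0) (((pvS M p).length : Int) - t0)) 0) = oPow p δ.toNat := by
      split_ifs with hlt
      · exact hgetI δ hδ0 hlt
      · have hmn := PySem.Int.mod_nonneg (δ - t0) hLpos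
        have hml := PySem.Int.mod_lt (δ - t0) hLpos
        rw [hgetI _ (by omega) (by omega)]
        have hcyc' : oPow p (t0 + (((pvS M p).length : Int) - t0)).toNat = oPow p t0.toNat := by
          rw [show (t0 + (((pvS M p).length : Int) - t0)).toNat = (pvS M p).length from by omega]
          exact hcyc.symm
        exact (orbit_per p hp t0 _ ht0nn hLpos hcyc' (δ - t0).toNat δ (by omega)).symm
    rw [hpw, hpm]
    by_cases hc : PySem.Int.mod (1 + g * oPow p δ.toNat) p = 0
    · rw [if_pos hc, if_pos hc]
      exact ⟨rfl, fun k => rfl⟩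
    · rw [if_neg hc, if_neg hc]
      by_cases hsmall : M - δ + 1 ≤ ((pvS M p).length : Int)
      · rw [min_eq_left hsmall]
        have hlist : (PySem.List.pyRange 0 (M - δ + 1) 1).map
            (fun a => (PySem.Int.mod (PySem.Int.powMod 2 a.toNat p
              * PySem.Int.mod (1 + g * oPow p δ.toNat) p) p, (1 : Int)))
            = (PySem.List.pyRange 0 (M - δ + 1) 1).map
            (fun i => (PySem.Int.mod (PySem.List.pyGetD (pvS M p) i 0
              * PySem.Int.mod (1 + g * oPow p δ.toNat) p) p,
              if i < t0 then (1 : Int)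
              else PySem.Int.floordiv (M - δ - i) (((pvS M p).length : Int) - t0) + 1)) := by
          apply List.map_congr_left
          intro a ha
          rcases PySem.List.mem_pyRange_one.mp ha with ⟨ha0, ha1⟩
          have hpma : PySem.Int.powMod 2 a.toNat p = oPow p a.toNat := PySem.Int.powMod_eq 2 a.toNat p
          rw [hpma, hgetI a ha0 (by omega)]
          by_cases hat : a < t0
          · rw [if_pos hat]
          · rw [if_neg hat]
            have hfd0 : PySem.Int.floordiv (M - δ - a) (((pvS M p).length : Int) - t0) = 0 :=
              (pyfd_mod_unique (M - δ - a) _ 0 (M - δ - a) hLpos (by omega) (by omega) (by ring)).1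
            rw [hfd0]
            norm_num
        rw [hlist]
        exact ⟨rfl, fun k => rfl⟩
      · rw [min_eq_right (by omega : ((pvS M p).length : Int) ≤ M - δ + 1)]
        have hlistA : (PySem.List.pyRange 0 (M - δ + 1) 1).map
            (fun a => (PySem.Int.mod (PySem.Int.powMod 2 a.toNat p
              * PySem.Int.mod (1 + g * oPow p δ.toNat) p) p, (1 : Int)))
            = (PySem.List.pyRange 0 (M - δ + 1) 1).map
            (fun a => (PySem.Int.mod (oPow p a.toNat
              * PySem.Int.mod (1 + g * oPow p δ.toNat) p) p, (1 : Int))) := by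
          apply List.map_congr_left
          intro a ha
          have hpma : PySem.Int.powMod 2 a.toNat p = oPow p a.toNat := PySem.Int.powMod_eq 2 a.toNat p
          rw [hpma]
        rw [hlistA]
        exact block_eq_core p (PySem.Int.mod (1 + g * oPow p δ.toNat) p) hp (pvS M p) t0
          (M - δ) (((pvS M p).length : Int) - t0) rfl (by omega) ht0nn ht0lt (by omega) hS hcyc

-- ===== VERDICT (by name: the statement is the Claim_ definition above) =====
theorem compute_Nr_via_delta_spec : Claim_equal_compute_Nr_via_delta := by
  intro M g p ord2 dl _ hpre
  unfold Spec_compute_Nr_via_delta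
  by_cases hM : M < 0
  · have hr : PySem.List.pyRange 0 (M + 1) 1 = [] := PySem.List.pyRange_one_eq_nil (by omega)
    unfold compute_Nr_via_delta compute_Nr_via_delta_alt
    rw [if_pos hM, hr]
    rfl
  · have hp : p ≠ 0 := hpre.resolve_right hM
    rw [portA_eq, portB_eq M g p ord2 dl hM]
    congr 1
    apply wBump_congr
    · simp [PySem.Dict.keys_empty]
    · rw [List.map_flatMap, List.map_flatMap]
      exact ofList_flatMap_congr _ _ _ (fun δ hδ =>
        (block_eq M g p hp (by omega) δ
          ((PySem.List.mem_pyRange_one).mp hδ).1 (by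
            have := ((PySem.List.mem_pyRange_one).mp hδ).2; omega)).1)
    · intro k
      exact wWeight_flatMap_congr _ _ _ (fun δ hδ k =>
        (block_eq M g p hp (by omega) δ
          ((PySem.List.mem_pyRange_one).mp hδ).1 (by
            have := ((PySem.List.mem_pyRange_one).mp hδ).2; omega)).2 k) k
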